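-- pv_equiv track=rewrite | github.com/Eual11/A2SV-Problems | 18-Feb-2025/Alternating Subsequence 272139.py | solve
-- ===== SOURCE A (Python) =====
-- def solve(arr):
--
--     seq =[arr[0]]
--
--     for i in range(1, len(arr)):
--         top = seq[-1]
--         n = arr[i]
--         if(n <0 and top<0):
--             # both negative, maximize by taking the max of the two
--             seq.pop()
--             seq.append(max(n, top))
--         elif(n >0 and top>0 ):
--             # both posetive, maximize by taking the max of the two
--             seq.pop()
--             seq.append(max(n, top))
--         else:
--             seq.append(n)
--
--
--
--     return sum(seq)
-- ===== SOURCE B (Python) =====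
-- def solve(arr):
--     # Staged run extraction: scan for maximal blocks with the same sign key
--     # sign(x) = (x>0)-(x<0); add each block's maximum to the total.
--     total = 0
--     i = 0
--     n = len(arr)
--     while i < n:
--         s = (arr[i] > 0) - (arr[i] < 0)
--         best = arr[i]
--         j = i + 1
--         while j < n and ((arr[j] > 0) - (arr[j] < 0)) == s:
--             if arr[j] > best:
--                 best = arr[j]
--             j += 1
--         total += best
--         i = j
--     return total
-- ===== Notes on version B (the rewrite author's own statement) =====
-- stated objective: alternative
-- what changed: Replaces A's element-by-element branch with pop/append run-merging on a list by a staged run-extraction scan: an outer loop that, per iteration, runs an inner scan finding the end and the maximum of the next maximal block of equal sign key sign(x)=(x>0)-(x<0), and adds that maximum to the total; no sequence is materialised. Pre_ excludes only the empty list, on which A raises IndexError.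
import Mathlib
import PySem

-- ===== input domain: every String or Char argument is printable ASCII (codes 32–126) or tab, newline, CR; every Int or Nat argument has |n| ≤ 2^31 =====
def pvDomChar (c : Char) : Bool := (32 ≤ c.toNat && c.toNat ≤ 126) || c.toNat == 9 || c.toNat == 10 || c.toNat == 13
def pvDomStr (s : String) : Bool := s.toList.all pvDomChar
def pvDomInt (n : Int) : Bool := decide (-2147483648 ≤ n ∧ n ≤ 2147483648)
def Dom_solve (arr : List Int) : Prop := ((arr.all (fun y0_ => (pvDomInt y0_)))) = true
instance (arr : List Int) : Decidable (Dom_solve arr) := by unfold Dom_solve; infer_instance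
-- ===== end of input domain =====

-- B replaces A's run-merging on an explicit list by a staged run-extraction scan
-- (outer loop over runs, inner scan for each run's end and maximum); equal on nonempty lists.

-- ===== PORT A =====
-- A's `seq` is kept head-reversed (head = Python seq[-1]); `top = seq[-1]` is the head,
-- `pop`+`append` is replacing the head, `append` is cons; sum is order-independent.
def solveStep (seq : List Int) (n : Int) : List Int :=
  let top := seq.headI
  if n < 0 ∧ top < 0 then max n top :: seq.tail
  else if n > 0 ∧ top > 0 then max n top :: seq.tail
  else n :: seq

def solve (arr : List Int) : Int :=
  match arr with
  | [] => 0  -- unreachable: Pre_solve excludes [] (Python raises IndexError)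
  | a :: rest => ((rest.foldl solveStep [a]).sum)

-- ===== PORT B =====
-- sign key (arr[j] > 0) - (arr[j] < 0)
def signKey (x : Int) : Int :=
  (if x > 0 then (1 : Int) else 0) - (if x < 0 then (1 : Int) else 0)

-- B's inner while loop: scan forward while the sign key equals s, tracking the best;
-- returns (best, remaining suffix) — the suffix plays the role of index j.
def runLoop (s : Int) (best : Int) : List Int → Int × List Int
  | [] => (best, [])
  | x :: xs =>
    if signKey x = s then runLoop s (if x > best then x else best) xs
    else (best, x :: xs)

theorem runLoop_len (s best : Int) (l : List Int) :
    (runLoop s best l).2.length ≤ l.length := by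
  induction l generalizing best with
  | nil => simp [runLoop]
  | cons x xs ih =>
    simp only [runLoop]
    split
    · exact le_trans (ih _) (Nat.le_succ _)
    · simp

-- B's outer while loop over runs.
def outerLoop : List Int → Int
  | [] => 0
  | x :: xs =>
    let r := runLoop (signKey x) x xs
    r.1 + outerLoop r.2
termination_by l => l.length
decreasing_by
  simpa using Nat.lt_succ_of_le (runLoop_len (signKey x) x xs)

def solve_alt (arr : List Int) : Int := outerLoop arr

-- ===== PRECONDITION & SPEC =====
-- Pre_ excludes only the empty list, on which Python A raises IndexError (arr[0]).
def Pre_solve (arr : List Int) : Prop := arr ≠ []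
instance (arr : List Int) : Decidable (Pre_solve arr) := by unfold Pre_solve; infer_instance
def pvWitness_solve : List Int := ([1, -2, -3, 4])

def Spec_solve (arr : List Int) (out : Int) : Prop := out = solve_alt arr
instance (arr : List Int) (out : Int) : Decidable (Spec_solve arr out) := by unfold Spec_solve; infer_instance

-- ===== CLAIM (what is proved, stated in full; the proofs are below) =====
def Claim_equal_solve : Prop := ∀ (arr : List Int), Dom_solve arr → Pre_solve arr → Spec_solve arr (solve arr)
-- ===== LEMMAS AND PROOFS =====

-- Invariant: A's reversed seq is c :: acc where c is the current run maximum; B's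
-- inner scan starting at (signKey c, c) plus the outer loop on the leftover computes
-- the same total for the unprocessed suffix.
theorem solve_loop_eq (rest : List Int) : ∀ (c : Int) (acc : List Int),
    (rest.foldl solveStep (c :: acc)).sum
      = acc.sum + ((runLoop (signKey c) c rest).1 + outerLoop (runLoop (signKey c) c rest).2) := by
  induction rest with
  | nil => intro c acc; simp [runLoop, outerLoop, Int.add_comm]
  | cons x xs ih =>
    intro c acc
    simp only [List.foldl_cons, solveStep, List.headI, List.tail]
    by_cases h1 : x < 0 ∧ c < 0
    · have hs : signKey x = signKey c := by
        simp [signKey, h1.1, h1.2, not_lt.mpr (le_of_lt h1.1), not_lt.mpr (le_of_lt h1.2)]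
      have hm : max x c = if x > c then x else c := by
        rcases le_or_gt x c with h | h
        · simp [max_eq_right h, not_lt.mpr h]
        · simp [max_eq_left (le_of_lt h), h]
      have hsk : signKey (max x c) = signKey c := by
        rcases le_or_gt x c with h | h
        · simp [max_eq_right h]
        · rw [max_eq_left (le_of_lt h), hs]
      simp only [h1, and_self, if_true, runLoop, hs, ← hm, hsk, ih]
    · by_cases h2 : x > 0 ∧ c > 0
      · have hs : signKey x = signKey c := by
          simp [signKey, h2.1, h2.2, not_lt.mpr (le_of_lt h2.1), not_lt.mpr (le_of_lt h2.2)]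
        have hm : max x c = if x > c then x else c := by
          rcases le_or_gt x c with h | h
          · simp [max_eq_right h, not_lt.mpr h]
          · simp [max_eq_left (le_of_lt h), h]
        have hsk : signKey (max x c) = signKey c := by
          rcases le_or_gt x c with h | h
          · simp [max_eq_right h]
          · rw [max_eq_left (le_of_lt h), hs]
        simp only [h1, if_false, h2, and_self, if_true, runLoop, hs, ← hm, hsk, ih]
      · -- else branch of A: either a sign change (run boundary) or both zero
        by_cases hz : signKey x = signKey c
        · -- both keys equal but not both strictly same-signed ⇒ x = 0 ∧ c = 0
          have hx0 : x = 0 ∧ c = 0 := by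
            unfold signKey at hz
            by_cases hxp : x > 0 <;> by_cases hxn : x < 0 <;>
              by_cases hcp : c > 0 <;> by_cases hcn : c < 0 <;>
              simp_all <;> omega
          obtain ⟨hx, hc⟩ := hx0
          subst hx; subst hc
          have := ih 0 (0 :: acc)
          simp only [List.sum_cons] at this
          simp [runLoop, signKey, this]
        · -- genuine run boundary: runLoop stops, c is added to the total
          simp only [h1, if_false, h2, if_false]
          have := ih x (c :: acc)
          simp only [List.sum_cons] at this
          rw [this]
          simp only [runLoop, if_neg hz, outerLoop]
          ring
-- ===== VERDICT (by name: the statement is the Claim_ definition above) =====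
theorem solve_spec : Claim_equal_solve := by
  intro arr _ hpre
  unfold Spec_solve solve solve_alt
  match arr with
  | [] => exact absurd rfl hpre
  | a :: rest =>
    simpa [outerLoop] using solve_loop_eq rest a []
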